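-- pv_equiv track=rewrite | github.com/S4yfullXD/super_intelligent_scanner | utils/file_organizer.py | get_content_category
-- ===== SOURCE A (Python) =====
-- def get_content_category(detected_lang: str, path: str) -> str:
--     """Enhanced category determination dengan path analysis"""
--     path_lower = path.lower()
--
--     # API endpoints (priority)
--     if any(api_indicator in path_lower for api_indicator in
--            ['/api/', '/v1/', '/v2/', '/v3/', '/graphql', '/rest/', '/json/']):
--         return 'api_endpoints'
--
--     # JavaScript files dengan enhanced categorization
--     elif detected_lang == 'javascript':
--         if any(static_indicator in path_lower for static_indicator in
--                ['/static/', '/_next/', '/build/', '/dist/']):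
--             return 'static_js'
--         elif any(asset_indicator in path_lower for asset_indicator in
--                  ['/assets/', '/js/', '/scripts/']):
--             return 'assets_js'
--         elif any(app_indicator in path_lower for app_indicator in
--                  ['/app/', '/src/', '/components/']):
--             return 'javascript'
--         else:
--             return 'javascript'
--
--     # HTML pages
--     elif detected_lang == 'html':
--         return 'html_pages'
--
--     # CSS/stylesheet files
--     elif detected_lang == 'css':
--         return 'stylesheets'
--
--     # JSON config/data files
--     elif detected_lang == 'json':
--         if any(config_indicator in path_lower for config_indicator in
--                ['config', 'setting', 'env', 'package']):
--             return 'config_data'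
--         else:
--             return 'api_endpoints'  # JSON APIs
--
--     # Python code
--     elif detected_lang == 'python':
--         return 'python_code'
--
--     # XML files
--     elif detected_lang == 'xml':
--         return 'documentation'
--
--     # Default categories
--     else:
--         if any(image_indicator in path_lower for image_indicator in
--                ['.jpg', '.jpeg', '.png', '.gif', '.svg', '.ico']):
--             return 'images'
--         elif any(font_indicator in path_lower for font_indicator in
--                  ['.woff', '.woff2', '.ttf', '.otf']):
--             return 'fonts'
--         elif any(media_indicator in path_lower for media_indicator in
--                  ['.mp4', '.mp3', '.avi', '.mov']):
--             return 'media'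
--         else:
--             return 'misc'
-- ===== SOURCE B (Python) =====
-- # Staged data-driven version: stage 1 computes all indicator flags from the
-- # path in one pass; stage 2 dispatches through a per-language rule table.
--
-- _GROUPS = {
--     'api':    ['/api/', '/v1/', '/v2/', '/v3/', '/graphql', '/rest/', '/json/'],
--     'static': ['/static/', '/_next/', '/build/', '/dist/'],
--     'assets': ['/assets/', '/js/', '/scripts/'],
--     'config': ['config', 'setting', 'env', 'package'],
--     'image':  ['.jpg', '.jpeg', '.png', '.gif', '.svg', '.ico'],
--     'font':   ['.woff', '.woff2', '.ttf', '.otf'],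
--     'media':  ['.mp4', '.mp3', '.avi', '.mov'],
-- }
--
-- # language -> (ordered flag rules, fallback category)
-- _LANG_RULES = {
--     'javascript': ([('static', 'static_js'), ('assets', 'assets_js')], 'javascript'),
--     'html':       ([], 'html_pages'),
--     'css':        ([], 'stylesheets'),
--     'json':       ([('config', 'config_data')], 'api_endpoints'),
--     'python':     ([], 'python_code'),
--     'xml':        ([], 'documentation'),
-- }
--
-- _DEFAULT_RULES = ([('image', 'images'), ('font', 'fonts'), ('media', 'media')], 'misc')
--
--
-- def get_content_category(detected_lang: str, path: str) -> str:
--     p = path.lower()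
--     # stage 1: evaluate every indicator group once
--     flags = {name: any(s in p for s in subs) for name, subs in _GROUPS.items()}
--     # stage 2: API flag wins unconditionally, then language-table dispatch
--     if flags['api']:
--         return 'api_endpoints'
--     rules, fallback = _LANG_RULES.get(detected_lang, _DEFAULT_RULES)
--     for flag, category in rules:
--         if flags[flag]:
--             return category
--     return fallback
-- ===== Notes on version B (the rewrite author's own statement) =====
-- stated objective: alternative
-- what changed: Replaced A's nested if/elif decision tree by a two-stage data-driven classifier: stage 1 eagerly computes a dict of indicator flags from the path, stage 2 dispatches through a per-language rule table looked up by dict, dropping A's dead app/src branch.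
import Mathlib
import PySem

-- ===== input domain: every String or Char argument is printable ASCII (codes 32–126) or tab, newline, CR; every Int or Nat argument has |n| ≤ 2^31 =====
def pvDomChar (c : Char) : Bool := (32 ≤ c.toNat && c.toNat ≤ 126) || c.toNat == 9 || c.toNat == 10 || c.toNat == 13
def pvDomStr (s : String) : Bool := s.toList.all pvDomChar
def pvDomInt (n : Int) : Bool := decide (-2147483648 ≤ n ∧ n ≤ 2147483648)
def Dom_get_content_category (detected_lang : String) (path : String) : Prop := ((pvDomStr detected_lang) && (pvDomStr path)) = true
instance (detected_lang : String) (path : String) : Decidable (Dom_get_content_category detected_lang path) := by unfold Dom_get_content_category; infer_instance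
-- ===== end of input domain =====

-- B is a staged data-driven rewrite: all indicator flags are computed eagerly in one stage, then a per-language rule table (dict dispatch) decides the category; same cost, alternative decomposition.


-- ===== PORT A =====
def get_content_category (detected_lang : String) (path : String) : String :=
  let path_lower := PySem.Str.lower path
  if ["/api/", "/v1/", "/v2/", "/v3/", "/graphql", "/rest/", "/json/"].any
       (fun s => PySem.Str.isIn s path_lower) then "api_endpoints"
  else if detected_lang == "javascript" then
    if ["/static/", "/_next/", "/build/", "/dist/"].any
         (fun s => PySem.Str.isIn s path_lower) then "static_js"
    else if ["/assets/", "/js/", "/scripts/"].any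
         (fun s => PySem.Str.isIn s path_lower) then "assets_js"
    else if ["/app/", "/src/", "/components/"].any
         (fun s => PySem.Str.isIn s path_lower) then "javascript"
    else "javascript"
  else if detected_lang == "html" then "html_pages"
  else if detected_lang == "css" then "stylesheets"
  else if detected_lang == "json" then
    if ["config", "setting", "env", "package"].any
         (fun s => PySem.Str.isIn s path_lower) then "config_data"
    else "api_endpoints"
  else if detected_lang == "python" then "python_code"
  else if detected_lang == "xml" then "documentation"
  else
    if [".jpg", ".jpeg", ".png", ".gif", ".svg", ".ico"].any
         (fun s => PySem.Str.isIn s path_lower) then "images"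
    else if [".woff", ".woff2", ".ttf", ".otf"].any
         (fun s => PySem.Str.isIn s path_lower) then "fonts"
    else if [".mp4", ".mp3", ".avi", ".mov"].any
         (fun s => PySem.Str.isIn s path_lower) then "media"
    else "misc"

-- ===== PORT B =====
-- module-level data tables of Source B
def pvGroups : List (String × List String) :=
  [ ("api",    ["/api/", "/v1/", "/v2/", "/v3/", "/graphql", "/rest/", "/json/"]),
    ("static", ["/static/", "/_next/", "/build/", "/dist/"]),
    ("assets", ["/assets/", "/js/", "/scripts/"]),
    ("config", ["config", "setting", "env", "package"]),
    ("image",  [".jpg", ".jpeg", ".png", ".gif", ".svg", ".ico"]),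
    ("font",   [".woff", ".woff2", ".ttf", ".otf"]),
    ("media",  [".mp4", ".mp3", ".avi", ".mov"]) ]

def pvLangRules : PySem.Dict String (List (String × String) × String) :=
  PySem.Dict.ofList
    [ ("javascript", ([("static", "static_js"), ("assets", "assets_js")], "javascript")),
      ("html",       ([], "html_pages")),
      ("css",        ([], "stylesheets")),
      ("json",       ([("config", "config_data")], "api_endpoints")),
      ("python",     ([], "python_code")),
      ("xml",        ([], "documentation")) ]

def pvDefaultRules : List (String × String) × String :=
  ([("image", "images"), ("font", "fonts"), ("media", "media")], "misc")

-- helper: first matching rule's category, else the fallback (the for-loop of Source B)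
def pvScanRules (flags : PySem.Dict String Bool) : List (String × String) → String → String
  | [], fallback => fallback
  | (flag, category) :: rest, fallback =>
      if flags.getD flag false then category else pvScanRules flags rest fallback

def get_content_category_alt (detected_lang : String) (path : String) : String :=
  let p := PySem.Str.lower path
  -- stage 1: dict comprehension evaluating every indicator group once
  let flags : PySem.Dict String Bool :=
    PySem.Dict.ofList (pvGroups.map (fun g => (g.1, g.2.any (fun s => PySem.Str.isIn s p))))
  -- stage 2: API flag wins, then language-table dispatch
  if flags.getD "api" false then "api_endpoints"
  else
    let rf := pvLangRules.getD detected_lang pvDefaultRules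
    pvScanRules flags rf.1 rf.2

-- ===== PRECONDITION & SPEC =====
def Spec_get_content_category (detected_lang : String) (path : String) (out : String) : Prop := out = get_content_category_alt detected_lang path
instance (detected_lang : String) (path : String) (out : String) : Decidable (Spec_get_content_category detected_lang path out) := by unfold Spec_get_content_category; infer_instance

-- ===== CLAIM (what is proved, stated in full; the proofs are below) =====
def Claim_equal_get_content_category : Prop := ∀ (detected_lang : String) (path : String), Dom_get_content_category detected_lang path → Spec_get_content_category detected_lang path (get_content_category detected_lang path)

-- ===== LEMMAS AND PROOFS =====

-- ===== VERDICT (by name: the statement is the Claim_ definition above) =====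
set_option maxHeartbeats 1000000 in
theorem get_content_category_spec : Claim_equal_get_content_category := by
  intro l p _
  unfold Spec_get_content_category get_content_category get_content_category_alt
  simp only [pvGroups, pvLangRules, pvDefaultRules, List.map, PySem.Dict.ofList,
    PySem.Dict.update, List.foldl, PySem.Dict.getD_insert, PySem.Dict.getD_empty]
  by_cases h1 : l = "javascript" <;> by_cases h2 : l = "html" <;>
    by_cases h3 : l = "css" <;> by_cases h4 : l = "json" <;>
    by_cases h5 : l = "python" <;> by_cases h6 : l = "xml" <;>
    simp_all [pvScanRules, PySem.Dict.getD_insert]
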